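-- pv_equiv track=rewrite | github.com/Gaucho98/random-exercises | tp7 ej14.py | informe
-- ===== SOURCE A (Python) =====
-- def informe(lista_nacimiento):
--     enero = 0
--     febrero = 0
--     marzo = 0
--     abril = 0
--     mayo = 0
--     junio = 0
--     julio = 0
--     agosto = 0
--     septiembre = 0
--     octubre = 0
--     noviembre = 0
--     diciembre = 0
--
--     for i in range(len(lista_nacimiento)):
--         if lista_nacimiento[i] == 1:
--             enero += 1
--         elif lista_nacimiento[i] == 2:
--             febrero += 1
--         elif lista_nacimiento[i] == 3:
--             marzo += 1
--         elif lista_nacimiento[i] == 4: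
--             abril += 1
--         elif lista_nacimiento[i] == 5:
--             mayo += 1
--         elif lista_nacimiento[i] == 6:
--             junio += 1
--         elif lista_nacimiento[i] == 7:
--             julio += 1
--         elif lista_nacimiento[i] == 8:
--             agosto += 1
--         elif lista_nacimiento[i] == 9:
--             septiembre += 1
--         elif lista_nacimiento[i] == 10:
--             octubre += 1
--         elif lista_nacimiento[i] == 11:
--             noviembre += 1
--         elif lista_nacimiento[i] == 12:
--             diciembre += 1
--     return enero,febrero,marzo,abril,mayo,junio,julio,agosto,septiembre,octubre,noviembre,diciembre
-- ===== SOURCE B (Python) =====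
-- def informe(lista_nacimiento):
--     # Twelve staged per-month scans: project each month's tally with list.count,
--     # instead of a single pass updating twelve named accumulators.
--     return tuple(lista_nacimiento.count(m) for m in range(1, 13))
-- ===== Notes on version B (the rewrite author's own statement) =====
-- stated objective: simpler
-- what changed: Replaces A's single pass with twelve named accumulators and a per-element 12-way elif chain by twelve independent list.count(m) scans, one per month, projected into the result tuple.
import Mathlib
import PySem

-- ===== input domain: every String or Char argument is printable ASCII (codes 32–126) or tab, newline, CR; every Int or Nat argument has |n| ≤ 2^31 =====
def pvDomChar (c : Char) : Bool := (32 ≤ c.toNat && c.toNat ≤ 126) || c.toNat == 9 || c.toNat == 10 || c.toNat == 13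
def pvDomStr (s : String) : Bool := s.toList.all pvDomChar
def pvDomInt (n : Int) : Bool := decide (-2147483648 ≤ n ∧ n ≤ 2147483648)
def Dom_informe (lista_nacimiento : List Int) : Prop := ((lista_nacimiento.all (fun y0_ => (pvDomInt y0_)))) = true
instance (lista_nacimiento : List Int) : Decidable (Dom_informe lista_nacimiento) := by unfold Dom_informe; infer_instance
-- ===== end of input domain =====

-- B replaces A's single pass over twelve named accumulators (12-way elif chain)
-- by twelve independent per-month list.count scans projected into the tuple (objective: simpler).

-- ===== PORT A =====
abbrev T12 := Int × Int × Int × Int × Int × Int × Int × Int × Int × Int × Int × Int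

-- one iteration of A's elif chain over the twelve accumulators
def informeStep (st : T12) (x : Int) : T12 :=
  match st with
  | (e, f, mz, ab, my, jn, jl, ag, se, oc, no, di) =>
    if x == 1 then (e + 1, f, mz, ab, my, jn, jl, ag, se, oc, no, di)
    else if x == 2 then (e, f + 1, mz, ab, my, jn, jl, ag, se, oc, no, di)
    else if x == 3 then (e, f, mz + 1, ab, my, jn, jl, ag, se, oc, no, di)
    else if x == 4 then (e, f, mz, ab + 1, my, jn, jl, ag, se, oc, no, di)
    else if x == 5 then (e, f, mz, ab, my + 1, jn, jl, ag, se, oc, no, di)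
    else if x == 6 then (e, f, mz, ab, my, jn + 1, jl, ag, se, oc, no, di)
    else if x == 7 then (e, f, mz, ab, my, jn, jl + 1, ag, se, oc, no, di)
    else if x == 8 then (e, f, mz, ab, my, jn, jl, ag + 1, se, oc, no, di)
    else if x == 9 then (e, f, mz, ab, my, jn, jl, ag, se + 1, oc, no, di)
    else if x == 10 then (e, f, mz, ab, my, jn, jl, ag, se, oc + 1, no, di)
    else if x == 11 then (e, f, mz, ab, my, jn, jl, ag, se, oc, no + 1, di)
    else if x == 12 then (e, f, mz, ab, my, jn, jl, ag, se, oc, no, di + 1)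
    else st

def informe (lista_nacimiento : List Int) : T12 :=
  -- for i in range(len(lista_nacimiento)): … lista_nacimiento[i] …
  (PySem.List.pyRange 0 (PySem.List.len lista_nacimiento) 1).foldl
    (fun st i => informeStep st (PySem.List.pyGetD lista_nacimiento i 0))
    (0, 0, 0, 0, 0, 0, 0, 0, 0, 0, 0, 0)

-- ===== PORT B =====
def informe_alt (lista_nacimiento : List Int) : T12 :=
  -- tuple(lista_nacimiento.count(m) for m in range(1, 13))
  (PySem.List.count lista_nacimiento 1, PySem.List.count lista_nacimiento 2,
   PySem.List.count lista_nacimiento 3, PySem.List.count lista_nacimiento 4,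
   PySem.List.count lista_nacimiento 5, PySem.List.count lista_nacimiento 6,
   PySem.List.count lista_nacimiento 7, PySem.List.count lista_nacimiento 8,
   PySem.List.count lista_nacimiento 9, PySem.List.count lista_nacimiento 10,
   PySem.List.count lista_nacimiento 11, PySem.List.count lista_nacimiento 12)

-- ===== PRECONDITION & SPEC =====
def Spec_informe (lista_nacimiento : List Int) (out : Int × Int × Int × Int × Int × Int × Int × Int × Int × Int × Int × Int) : Prop := out = informe_alt lista_nacimiento
instance (lista_nacimiento : List Int) (out : Int × Int × Int × Int × Int × Int × Int × Int × Int × Int × Int × Int) : Decidable (Spec_informe lista_nacimiento out) := by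
  unfold Spec_informe
  haveI h3 : DecidableEq (Int × Int × Int) := instDecidableEqProd
  haveI h4 : DecidableEq (Int × Int × Int × Int) := instDecidableEqProd
  haveI h5 : DecidableEq (Int × Int × Int × Int × Int) := instDecidableEqProd
  haveI h6 : DecidableEq (Int × Int × Int × Int × Int × Int) := instDecidableEqProd
  haveI h7 : DecidableEq (Int × Int × Int × Int × Int × Int × Int) := instDecidableEqProd
  haveI h8 : DecidableEq (Int × Int × Int × Int × Int × Int × Int × Int) := instDecidableEqProd
  haveI h9 : DecidableEq (Int × Int × Int × Int × Int × Int × Int × Int × Int) := instDecidableEqProd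
  haveI h10 : DecidableEq (Int × Int × Int × Int × Int × Int × Int × Int × Int × Int) := instDecidableEqProd
  haveI h11 : DecidableEq (Int × Int × Int × Int × Int × Int × Int × Int × Int × Int × Int) := instDecidableEqProd
  haveI h12 : DecidableEq (Int × Int × Int × Int × Int × Int × Int × Int × Int × Int × Int × Int) := instDecidableEqProd
  infer_instance

-- ===== CLAIM (what is proved, stated in full; the proofs are below) =====
def Claim_equal_informe : Prop := ∀ (lista_nacimiento : List Int), Dom_informe lista_nacimiento → Spec_informe lista_nacimiento (informe lista_nacimiento)

-- ===== LEMMAS AND PROOFS =====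

-- the elif chain, written as one componentwise update
theorem informeStep_eq (st : T12) (x : Int) :
    informeStep st x =
      (st.1 + (if x = 1 then 1 else 0), st.2.1 + (if x = 2 then 1 else 0),
       st.2.2.1 + (if x = 3 then 1 else 0), st.2.2.2.1 + (if x = 4 then 1 else 0),
       st.2.2.2.2.1 + (if x = 5 then 1 else 0), st.2.2.2.2.2.1 + (if x = 6 then 1 else 0),
       st.2.2.2.2.2.2.1 + (if x = 7 then 1 else 0), st.2.2.2.2.2.2.2.1 + (if x = 8 then 1 else 0),
       st.2.2.2.2.2.2.2.2.1 + (if x = 9 then 1 else 0), st.2.2.2.2.2.2.2.2.2.1 + (if x = 10 then 1 else 0),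
       st.2.2.2.2.2.2.2.2.2.2.1 + (if x = 11 then 1 else 0), st.2.2.2.2.2.2.2.2.2.2.2 + (if x = 12 then 1 else 0)) := by
  obtain ⟨e, f, mz, ab, my, jn, jl, ag, se, oc, no, di⟩ := st
  by_cases h1 : x = 1
  · subst h1
    rw [show informeStep (e, f, mz, ab, my, jn, jl, ag, se, oc, no, di) 1 = (e + 1, f, mz, ab, my, jn, jl, ag, se, oc, no, di) from rfl]
    norm_num
  by_cases h2 : x = 2
  · subst h2
    rw [show informeStep (e, f, mz, ab, my, jn, jl, ag, se, oc, no, di) 2 = (e, f + 1, mz, ab, my, jn, jl, ag, se, oc, no, di) from rfl]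
    norm_num
  by_cases h3 : x = 3
  · subst h3
    rw [show informeStep (e, f, mz, ab, my, jn, jl, ag, se, oc, no, di) 3 = (e, f, mz + 1, ab, my, jn, jl, ag, se, oc, no, di) from rfl]
    norm_num
  by_cases h4 : x = 4
  · subst h4
    rw [show informeStep (e, f, mz, ab, my, jn, jl, ag, se, oc, no, di) 4 = (e, f, mz, ab + 1, my, jn, jl, ag, se, oc, no, di) from rfl]
    norm_num
  by_cases h5 : x = 5
  · subst h5
    rw [show informeStep (e, f, mz, ab, my, jn, jl, ag, se, oc, no, di) 5 = (e, f, mz, ab, my + 1, jn, jl, ag, se, oc, no, di) from rfl]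
    norm_num
  by_cases h6 : x = 6
  · subst h6
    rw [show informeStep (e, f, mz, ab, my, jn, jl, ag, se, oc, no, di) 6 = (e, f, mz, ab, my, jn + 1, jl, ag, se, oc, no, di) from rfl]
    norm_num
  by_cases h7 : x = 7
  · subst h7
    rw [show informeStep (e, f, mz, ab, my, jn, jl, ag, se, oc, no, di) 7 = (e, f, mz, ab, my, jn, jl + 1, ag, se, oc, no, di) from rfl]
    norm_num
  by_cases h8 : x = 8
  · subst h8
    rw [show informeStep (e, f, mz, ab, my, jn, jl, ag, se, oc, no, di) 8 = (e, f, mz, ab, my, jn, jl, ag + 1, se, oc, no, di) from rfl]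
    norm_num
  by_cases h9 : x = 9
  · subst h9
    rw [show informeStep (e, f, mz, ab, my, jn, jl, ag, se, oc, no, di) 9 = (e, f, mz, ab, my, jn, jl, ag, se + 1, oc, no, di) from rfl]
    norm_num
  by_cases h10 : x = 10
  · subst h10
    rw [show informeStep (e, f, mz, ab, my, jn, jl, ag, se, oc, no, di) 10 = (e, f, mz, ab, my, jn, jl, ag, se, oc + 1, no, di) from rfl]
    norm_num
  by_cases h11 : x = 11
  · subst h11
    rw [show informeStep (e, f, mz, ab, my, jn, jl, ag, se, oc, no, di) 11 = (e, f, mz, ab, my, jn, jl, ag, se, oc, no + 1, di) from rfl]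
    norm_num
  by_cases h12 : x = 12
  · subst h12
    rw [show informeStep (e, f, mz, ab, my, jn, jl, ag, se, oc, no, di) 12 = (e, f, mz, ab, my, jn, jl, ag, se, oc, no, di + 1) from rfl]
    norm_num
  rw [informeStep]
  simp only [beq_iff_eq, if_neg h1, if_neg h2, if_neg h3, if_neg h4, if_neg h5, if_neg h6, if_neg h7, if_neg h8, if_neg h9, if_neg h10, if_neg h11, if_neg h12]
  norm_num [h1, h2, h3, h4, h5, h6, h7, h8, h9, h10, h11, h12]
theorem informe_foldl_counts (xs : List Int) (e f mz ab my jn jl ag se oc no di : Int) :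
    xs.foldl informeStep (e, f, mz, ab, my, jn, jl, ag, se, oc, no, di) =
      (e + xs.count 1, f + xs.count 2, mz + xs.count 3, ab + xs.count 4,
       my + xs.count 5, jn + xs.count 6, jl + xs.count 7, ag + xs.count 8,
       se + xs.count 9, oc + xs.count 10, no + xs.count 11, di + xs.count 12) := by
  induction xs generalizing e f mz ab my jn jl ag se oc no di with
  | nil => simp
  | cons x xs ih =>
    rw [List.foldl_cons, informeStep_eq, ih]
    simp only [Prod.mk.injEq, List.count_cons, beq_iff_eq]
    refine ⟨?_, ?_, ?_, ?_, ?_, ?_, ?_, ?_, ?_, ?_, ?_, ?_⟩ <;>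
      (push_cast; split_ifs <;> omega)

-- ===== VERDICT (by name: the statement is the Claim_ definition above) =====
theorem informe_spec : Claim_equal_informe := by
  intro xs _
  show informe xs = informe_alt xs
  unfold informe informe_alt
  rw [show PySem.List.len xs = ((xs.length : Int)) from rfl,
      PySem.List.foldl_pyRange_pyGetD' xs 0 informeStep (0, 0, 0, 0, 0, 0, 0, 0, 0, 0, 0, 0) (le_refl 0)]
  simp [informe_foldl_counts, PySem.List.count_eq]
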